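-- pv_equiv track=rewrite | github.com/Liberation-Labs-THCoalition/Project-Emet | emet/ftm/external/entity_resolution.py | _metaphone
-- ===== SOURCE A (Python) =====
-- def _metaphone(name: str) -> str:
--     """Simple metaphone-like phonetic encoding for blocking.
--
--     Not a full metaphone implementation — just consonant skeleton
--     for fast blocking. Production would use jellyfish.metaphone().
--     """
--     if not name:
--         return ""
--     # Keep first letter, remove vowels, deduplicate consonants
--     result = name[0].upper()
--     prev = result
--     for c in name[1:].upper():
--         if c in "AEIOU":
--             continue
--         if c != prev:
--             result += c
--             prev = c
--     return result[:6]
-- ===== SOURCE B (Python) =====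
-- _DROP_VOWELS = str.maketrans("", "", "AEIOU")
--
--
-- def _metaphone(name: str) -> str:
--     if not name:
--         return ""
--     # first letter kept unconditionally; vowels deleted from the rest via a translation table
--     seq = name[0].upper() + name[1:].upper().translate(_DROP_VOWELS)
--     # collapse runs by comparing seq with its own 1-shift: keep each char that
--     # differs from its successor (i.e. the last char of every run), plus the final char
--     return ("".join(c for c, n in zip(seq, seq[1:]) if c != n) + seq[-1])[:6]
-- ===== Notes on version B (the rewrite author's own statement) =====
-- stated objective: alternative
-- what changed: Instead of one fused loop carrying (result, prev) state, B deletes vowels with a str.translate deletion table and collapses duplicate runs by zipping the string with its own 1-shift, keeping each character that differs from its successor (the run ends) plus the final character; no previous-character state is maintained.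
import Mathlib
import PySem

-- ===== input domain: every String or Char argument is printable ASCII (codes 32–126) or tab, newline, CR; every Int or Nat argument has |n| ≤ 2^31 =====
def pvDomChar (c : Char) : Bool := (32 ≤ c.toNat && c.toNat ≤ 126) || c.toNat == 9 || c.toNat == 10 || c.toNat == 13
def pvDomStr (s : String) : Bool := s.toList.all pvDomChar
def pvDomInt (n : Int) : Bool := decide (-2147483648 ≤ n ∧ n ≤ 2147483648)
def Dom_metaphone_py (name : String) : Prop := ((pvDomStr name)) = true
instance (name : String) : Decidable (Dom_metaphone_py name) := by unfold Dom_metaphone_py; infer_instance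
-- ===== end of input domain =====

-- B: removes vowels with a translation table and collapses duplicate runs by comparing the string with its own 1-shift (keeping run ends), instead of A's fused loop with (result, prev) state.


-- ===== PORT A =====
def pvVowels : List Char := ['A', 'E', 'I', 'O', 'U']

-- A's for-loop: state (result, prev), branches in source order
def pvLoopA : List Char → List Char → Char → List Char
  | [], result, _ => result
  | c :: cs, result, prev =>
    if pvVowels.contains c then pvLoopA cs result prev
    else if c ≠ prev then pvLoopA cs (result ++ [c]) c
    else pvLoopA cs result prev

def metaphone_py (name : String) : String :=
  match name.toList with
  | [] => ""
  | h :: t =>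
    let first := PySem.Chars.upperChar h
    let result := pvLoopA (PySem.Chars.upper t) [first] first
    String.ofList (PySem.List.slice result none (some 6))

-- ===== PORT B =====
-- Source B: seq = first + translate-deleted tail (deletion table = filter out AEIOU);
-- dedup = zip seq with its 1-shift, keep chars differing from their successor, append last char; take 6.
def metaphone_py_alt (name : String) : String :=
  match name.toList with
  | [] => ""
  | h :: t =>
    let seq := PySem.Chars.upperChar h ::
      (PySem.Chars.upper t).filter (fun c => !pvVowels.contains c)
    String.ofList
      (((((seq.zip (seq.drop 1)).filter (fun q => q.1 ≠ q.2)).map Prod.fst)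
          ++ [seq.getLast (List.cons_ne_nil _ _)]).take 6)

-- ===== PRECONDITION & SPEC =====
def Spec_metaphone_py (name : String) (out : String) : Prop := out = metaphone_py_alt name
instance (name : String) (out : String) : Decidable (Spec_metaphone_py name out) := by unfold Spec_metaphone_py; infer_instance

-- ===== CLAIM =====
def Claim_equal_metaphone_py : Prop := ∀ (name : String), Dom_metaphone_py name → Spec_metaphone_py name (metaphone_py name)

-- ===== LEMMAS AND PROOFS =====
-- dedup with the previous kept character as explicit state (characterises A's loop)
def pvDedupTail (prev : Char) : List Char → List Char
  | [] => []
  | x :: xs => if x = prev then pvDedupTail prev xs else x :: pvDedupTail x xs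

lemma pvLoopA_eq (cs : List Char) :
    ∀ (acc : List Char) (prev : Char),
      pvLoopA cs acc prev =
        acc ++ pvDedupTail prev (cs.filter (fun c => !pvVowels.contains c)) := by
  induction cs with
  | nil => intro acc prev; simp [pvLoopA, pvDedupTail]
  | cons c cs ih =>
    intro acc prev
    by_cases hv : c ∈ pvVowels
    · simp [pvLoopA, hv, ih]
    · by_cases hp : c = prev
      · subst hp; simp [pvLoopA, hv, ih, pvDedupTail]
      · simp [pvLoopA, hv, hp, ih, pvDedupTail]

-- B's shift-compare dedup (keep run ends + last char) equals the prev-state dedup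
lemma pvZipLast_eq (xs : List Char) :
    ∀ (x : Char),
      ((((x :: xs).zip xs).filter (fun q => q.1 ≠ q.2)).map Prod.fst)
          ++ [(x :: xs).getLast (List.cons_ne_nil _ _)]
        = x :: pvDedupTail x xs := by
  induction xs with
  | nil => intro x; simp [pvDedupTail]
  | cons y ys ih =>
    intro x
    simp only [List.zip_cons_cons, List.filter_cons,
      List.getLast_cons (List.cons_ne_nil _ _)]
    by_cases h : x = y
    · subst h
      rw [if_neg (by simp), ih x]
      simp [pvDedupTail]
    · rw [if_pos (by simp [h])]
      simp only [List.map_cons, List.cons_append]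
      rw [ih y]
      simp [pvDedupTail, Ne.symm h]

-- ===== VERDICT =====
theorem metaphone_py_spec : Claim_equal_metaphone_py := by
  intro name _
  unfold Spec_metaphone_py metaphone_py metaphone_py_alt
  cases h : name.toList with
  | nil => rfl
  | cons hd tl =>
    simp only [List.drop_one, List.tail_cons]
    rw [pvZipLast_eq, pvLoopA_eq, PySem.List.slice_to _ (by norm_num)]
    simp
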